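-- pv_equiv track=rewrite | github.com/dddjjjbbb/Kolium | src/kolium/parser.py | _normalised_lines
-- ===== SOURCE A (Python) =====
-- def _normalised_lines(text: str) -> list[str]:
--     """Join multi-line highlights into single lines.
--
--     KOReader can export highlights that span multiple lines. A highlight
--     opens with * on one line and closes with * on a later line. These
--     need joining before line-by-line extraction can see them.
--     """
--     result: list[str] = []
--     buffer: list[str] = []
--
--     for line in text.splitlines():
--         stripped = line.strip()
--
--         if buffer:
--             buffer.append(stripped)
--             if stripped.endswith("*"):
--                 result.append(" ".join(buffer))
--                 buffer = []
--         elif stripped.startswith("*") and not stripped.endswith("*") and len(stripped) > 1: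
--             buffer.append(stripped)
--         else:
--             result.append(line)
--
--     # Unclosed highlight — append lines as-is rather than losing them
--     result.extend(buffer)
--     return result
-- ===== SOURCE B (Python) =====
-- def _normalised_lines(text: str) -> list[str]:
--     """Join multi-line highlights into single lines (index + inner scan)."""
--     lines = text.splitlines()
--     n = len(lines)
--     result: list[str] = []
--     i = 0
--     while i < n:
--         s = lines[i].strip()
--         if s.startswith("*") and not s.endswith("*") and len(s) > 1:
--             block = [s]
--             j = i + 1
--             while j < n:
--                 t = lines[j].strip()
--                 block.append(t)
--                 if t.endswith("*"):
--                     break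
--                 j += 1
--             if j < n:
--                 result.append(" ".join(block))
--                 i = j + 1
--             else:
--                 result.extend(block)
--                 i = n
--         else:
--             result.append(lines[i])
--             i += 1
--     return result
-- ===== Notes on version B (the rewrite author's own statement) =====
-- stated objective: alternative
-- what changed: Replaces A's flag-driven accumulator (a pending-buffer carried through one fold) by an explicit index loop with an inner scan that gathers a whole highlight block at once and jumps past it.
import Mathlib
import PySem

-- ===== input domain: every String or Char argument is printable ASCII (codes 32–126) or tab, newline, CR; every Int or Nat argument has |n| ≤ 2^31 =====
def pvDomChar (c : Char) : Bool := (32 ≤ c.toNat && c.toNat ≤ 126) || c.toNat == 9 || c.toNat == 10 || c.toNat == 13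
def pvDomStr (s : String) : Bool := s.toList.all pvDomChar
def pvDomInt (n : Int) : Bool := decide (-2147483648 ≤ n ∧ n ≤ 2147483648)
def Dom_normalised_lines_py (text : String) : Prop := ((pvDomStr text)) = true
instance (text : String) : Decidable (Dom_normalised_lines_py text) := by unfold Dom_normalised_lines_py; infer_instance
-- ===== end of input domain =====

-- B replaces A's flag-driven buffer fold by an index loop with an inner block scan; same cost, alternative decomposition.

-- ===== PORT A =====
-- one loop iteration of A: state = (result, buffer)
def pvStepA (st : List String × List String) (line : String) : List String × List String :=
  let stripped := PySem.Str.strip line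
  if st.2 ≠ [] then
    let buffer := st.2 ++ [stripped]
    if PySem.Str.endswith stripped "*" then (st.1 ++ [PySem.Str.join " " buffer], [])
    else (st.1, buffer)
  else if PySem.Str.startswith stripped "*" && !PySem.Str.endswith stripped "*"
          && decide (1 < PySem.Str.len stripped) then
    (st.1, st.2 ++ [stripped])
  else (st.1 ++ [line], st.2)

def normalised_lines_py (text : String) : List String :=
  let st := (PySem.Str.splitlines text).foldl pvStepA ([], [])
  st.1 ++ st.2

-- ===== PORT B =====
-- inner while-loop of B: collect stripped lines into the block, stop at a line ending in "*";
-- Sum.inl (block, rest) = closing line found (j < n), Sum.inr block = ran off the end.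
def pvScanBlock (acc : List String) : List String → (List String × List String) ⊕ List String
  | [] => Sum.inr acc
  | l :: rest =>
      let t := PySem.Str.strip l
      if PySem.Str.endswith t "*" then Sum.inl (acc ++ [t], rest)
      else pvScanBlock (acc ++ [t]) rest

theorem pvScanBlock_len (lines : List String) : ∀ (acc b r : List String),
    pvScanBlock acc lines = Sum.inl (b, r) → r.length < lines.length := by
  induction lines with
  | nil => intro acc b r h; simp [pvScanBlock] at h
  | cons l rest ih =>
      intro acc b r h
      simp only [pvScanBlock] at h
      split at h
      · cases h; simp
      · exact Nat.lt_trans (ih _ _ _ h) (by simp)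

-- outer while-loop of B over the remaining lines
def pvGoB : List String → List String
  | [] => []
  | l :: rest =>
      let s := PySem.Str.strip l
      if PySem.Str.startswith s "*" && !PySem.Str.endswith s "*"
          && decide (1 < PySem.Str.len s) then
        match h : pvScanBlock [s] rest with
        | Sum.inl (block, rest') => PySem.Str.join " " block :: pvGoB rest'
        | Sum.inr block => block
      else l :: pvGoB rest
  termination_by lines => lines.length
  decreasing_by
  · exact Nat.lt_trans (pvScanBlock_len _ _ _ _ h) (by simp)
  · simp

def normalised_lines_py_alt (text : String) : List String :=
  pvGoB (PySem.Str.splitlines text)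

-- ===== PRECONDITION & SPEC =====
def Spec_normalised_lines_py (text : String) (out : List String) : Prop := out = normalised_lines_py_alt text
instance (text : String) (out : List String) : Decidable (Spec_normalised_lines_py text out) := by unfold Spec_normalised_lines_py; infer_instance

-- ===== CLAIM (what is proved, stated in full; the proofs are below) =====
def Claim_equal_normalised_lines_py : Prop := ∀ (text : String), Dom_normalised_lines_py text → Spec_normalised_lines_py text (normalised_lines_py text)

-- ===== LEMMAS AND PROOFS =====

def pvAFold (st : List String × List String) (lines : List String) : List String :=
  let st' := lines.foldl pvStepA st
  st'.1 ++ st'.2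

-- A's fold with a nonempty buffer behaves like B's inner scan
theorem pvAFold_buf (lines : List String) : ∀ (res buf : List String), buf ≠ [] →
    pvAFold (res, buf) lines =
      (match pvScanBlock buf lines with
       | Sum.inl (b, rest) => pvAFold (res ++ [PySem.Str.join " " b], []) rest
       | Sum.inr b => res ++ b) := by
  induction lines with
  | nil => intro res buf h; simp [pvAFold, pvScanBlock]
  | cons l rest ih =>
      intro res buf h
      simp only [pvAFold, List.foldl_cons, pvScanBlock, pvStepA, h, if_pos, ne_eq,
        not_false_iff]
      by_cases he : PySem.Str.endswith (PySem.Str.strip l) "*" = true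
      · rw [if_pos he, if_pos he]
      · rw [if_neg he, if_neg he]
        exact ih res (buf ++ [PySem.Str.strip l]) (by simp)

-- A's fold with an empty buffer computes B's outer loop
theorem pvAFold_nil (lines : List String) : ∀ (res : List String),
    pvAFold (res, []) lines = res ++ pvGoB lines := by
  induction hn : lines.length using Nat.strong_induction_on generalizing lines with
  | _ n ih =>
    intro res
    match lines with
    | [] => simp [pvAFold, pvGoB]
    | l :: rest =>
      rw [pvGoB]
      simp only [pvAFold, List.foldl_cons, pvStepA]
      by_cases hc : (PySem.Str.startswith (PySem.Str.strip l) "*"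
          && !PySem.Str.endswith (PySem.Str.strip l) "*"
          && decide (1 < PySem.Str.len (PySem.Str.strip l))) = true
      · simp only [hc, ne_eq, not_true_eq_false, if_true, if_neg, not_false_iff]
        have hbuf : pvAFold (res, [PySem.Str.strip l]) rest =
            (match pvScanBlock [PySem.Str.strip l] rest with
             | Sum.inl (b, rest') => pvAFold (res ++ [PySem.Str.join " " b], []) rest'
             | Sum.inr b => res ++ b) := pvAFold_buf rest res _ (by simp)
        show pvAFold (res, [PySem.Str.strip l]) rest = _
        rw [hbuf]
        match hscan : pvScanBlock [PySem.Str.strip l] rest with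
        | Sum.inl (b, rest') =>
            simp only []
            have hlen : rest'.length < n := by
              subst hn
              exact Nat.lt_trans (pvScanBlock_len _ _ _ _ hscan) (by simp)
            rw [ih rest'.length hlen rest' rfl (res ++ [PySem.Str.join " " b])]
            simp
        | Sum.inr b => simp
      · simp only [hc, ne_eq, not_true_eq_false, if_neg, Bool.false_eq_true, not_false_iff]
        show pvAFold (res ++ [l], []) rest = _
        have hlen : rest.length < n := by subst hn; simp
        rw [ih rest.length hlen rest rfl (res ++ [l])]
        simp

-- ===== VERDICT (by name: the statement is the Claim_ definition above) =====
theorem normalised_lines_py_spec : Claim_equal_normalised_lines_py := by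
  intro text _
  show normalised_lines_py text = normalised_lines_py_alt text
  unfold normalised_lines_py normalised_lines_py_alt
  exact pvAFold_nil (PySem.Str.splitlines text) []
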